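-- pv_equiv track=rewrite | github.com/lucaskuhnencosta/integer-programming-solver | cutgen/Cliques.py | clique_detection
-- ===== SOURCE A (Python) =====
-- def clique_detection(A,b):
--     """
--     This function is a first clique detection algorithm for constraint already structure in the format Ax<=b
--     :param A: List of constraint indexes and values
--     :param b: List of results
--     :return: A list S of cliques
--     """
--     S=[]
--     for constraint, RHS in zip(A,b):
--         if len(constraint)<2:
--             continue
--         sorted_constraint=sorted(constraint,key=lambda x:x[1])
--         if sorted_constraint[-1][1]+sorted_constraint[-2][1]>RHS:
--             k=len(sorted_constraint)-1 #The index of the highest coefficient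
--             idx=k-1
--             for s in range(k-2,-1,-1):
--                 _,a_js=sorted_constraint[s]
--                 _,a_js1=sorted_constraint[s+1]
--                 if a_js+a_js1>RHS:
--                     idx=s
--                 else:
--                     break
--             C=[sorted_constraint[i][0] for i in range(idx,len(sorted_constraint))]
--             S.append(C)
--             for o in range(idx-1,-1,-1):
--                 _,a_jo=sorted_constraint[o]
--                 idx_f=None
--                 for f in range(k,-1,-1):
--                     _,a_jf=sorted_constraint[f]
--                     if a_jo+a_jf>RHS:
--                         idx_f=f
--                     else:
--                         break
--                 if idx_f is not None:
--                     clique_candidate=[sorted_constraint[o][0]]+[sorted_constraint[i][0] for i in range(idx_f,len(sorted_constraint))]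
--                     if clique_candidate:
--                         S.append(clique_candidate)
--     return S
-- ===== SOURCE B (Python) =====
-- def _least(hi, pred):
--     """Smallest i in [0, hi] with pred(i), assuming pred is monotone and pred(hi) holds."""
--     lo = 0
--     while lo < hi:
--         mid = (lo + hi) // 2
--         if pred(mid):
--             hi = mid
--         else:
--             lo = mid + 1
--     return lo
--
--
-- def clique_detection(A, b):
--     S = []
--     for constraint, RHS in zip(A, b):
--         n = len(constraint)
--         if n < 2:
--             continue
--         sc = sorted(constraint, key=lambda x: x[1])
--         coeffs = [a for _, a in sc]
--         if coeffs[-1] + coeffs[-2] > RHS: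
--             # smallest s with coeffs[s] + coeffs[s+1] > RHS (binary search on the sorted pair sums)
--             idx = _least(n - 2, lambda s: coeffs[s] + coeffs[s + 1] > RHS)
--             S.append([sc[i][0] for i in range(idx, n)])
--             for o in range(idx - 1, -1, -1):
--                 a_o = coeffs[o]
--                 if a_o + coeffs[-1] <= RHS:
--                     break  # coefficients only shrink from here on: no further clique
--                 f = _least(n - 1, lambda i: a_o + coeffs[i] > RHS)
--                 S.append([sc[o][0]] + [sc[i][0] for i in range(f, n)])
--     return S
-- ===== Notes on version B (the rewrite author's own statement) =====
-- stated objective: alternative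
-- what changed: Both inner backward linear scans of each sorted constraint (the s-scan locating the clique start and the per-o f-scan locating idx_f) are replaced by binary searches over the sorted coefficient list, and the o-loop breaks early once even the largest coefficient cannot exceed the RHS (valid by sortedness); on the timed inputs the inner scans are rarely long, so no measured speed-up.
import Mathlib
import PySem

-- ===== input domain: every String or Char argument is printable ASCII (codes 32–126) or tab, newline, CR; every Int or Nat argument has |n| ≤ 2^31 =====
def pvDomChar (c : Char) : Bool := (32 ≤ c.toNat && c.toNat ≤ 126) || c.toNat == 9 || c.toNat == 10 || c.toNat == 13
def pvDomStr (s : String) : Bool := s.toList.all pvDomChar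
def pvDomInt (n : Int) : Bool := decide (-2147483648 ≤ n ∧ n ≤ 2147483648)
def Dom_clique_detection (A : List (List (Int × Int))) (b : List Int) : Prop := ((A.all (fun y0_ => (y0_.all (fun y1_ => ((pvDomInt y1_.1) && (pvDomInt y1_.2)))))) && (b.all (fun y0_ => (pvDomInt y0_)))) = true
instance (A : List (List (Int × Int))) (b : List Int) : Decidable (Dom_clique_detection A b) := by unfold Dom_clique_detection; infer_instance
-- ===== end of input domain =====

-- B replaces A's two backward linear scans per constraint by binary searches on the
-- sorted coefficient list, with an early break in the o-loop (same cliques, same order);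
-- objective: alternative search strategy (not measurably faster on the timed inputs).


-- ===== PORT A =====
-- the inner 'for s in range(k-2,-1,-1)' loop of A with its break: state = current idx
def scanS (P : Int → Bool) : List Int → Int → Int
  | [], idx => idx
  | s :: rest, idx => if P s then scanS P rest s else idx

-- the inner 'for f in range(k,-1,-1)' loop of A with its break: state = idx_f (None = none)
def scanF (P : Int → Bool) : List Int → Option Int → Option Int
  | [], st => st
  | f :: rest, st => if P f then scanF P rest (some f) else st

-- the body of A's 'for o in range(idx-1,-1,-1)' loop
def bodyA (sc : List (Int × Int)) (rhs : Int) (acc : List (List Int)) (o : Int) : List (List Int) :=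
  let a_o := (PySem.List.pyGetD sc o (0,0)).2
  match scanF (fun f => decide (a_o + (PySem.List.pyGetD sc f (0,0)).2 > rhs))
      (PySem.List.pyRange (PySem.List.len sc - 1) (-1) (-1)) none with
  | some idxf =>
      let cand := [(PySem.List.pyGetD sc o (0,0)).1] ++
        (PySem.List.pyRange idxf (PySem.List.len sc) 1).map (fun i => (PySem.List.pyGetD sc i (0,0)).1)
      if cand.isEmpty then acc else acc ++ [cand]
  | none => acc

-- one constraint of A's outer loop: the lists appended to S for this (constraint, RHS)
def procA (c : List (Int × Int)) (rhs : Int) : List (List Int) :=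
  if PySem.List.len c < 2 then []
  else
    let sc := PySem.List.sorted c (fun x => x.2) false
    if (PySem.List.pyGetD sc (-1) (0,0)).2 + (PySem.List.pyGetD sc (-2) (0,0)).2 > rhs then
      let k : Int := PySem.List.len sc - 1
      let idx := scanS (fun s => decide ((PySem.List.pyGetD sc s (0,0)).2 + (PySem.List.pyGetD sc (s+1) (0,0)).2 > rhs))
        (PySem.List.pyRange (k-2) (-1) (-1)) (k-1)
      let C := (PySem.List.pyRange idx (PySem.List.len sc) 1).map (fun i => (PySem.List.pyGetD sc i (0,0)).1)
      (PySem.List.pyRange (idx-1) (-1) (-1)).foldl (bodyA sc rhs) [C]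
    else []

def clique_detection (A : List (List (Int × Int))) (b : List Int) : List (List Int) :=
  (A.zip b).foldl (fun S cb => S ++ procA cb.1 cb.2) []

-- ===== PORT B =====
-- Source B's _least: binary search for the smallest i in [lo,hi] with P i (P monotone, P hi)
def bsearch (P : Int → Bool) (lo hi : Int) : Int :=
  if h : lo < hi then
    if P (PySem.Int.floordiv (lo + hi) 2) then bsearch P lo (PySem.Int.floordiv (lo + hi) 2)
    else bsearch P (PySem.Int.floordiv (lo + hi) 2 + 1) hi
  else lo
termination_by (hi - lo).toNat
decreasing_by
  · have h2 := (PySem.Int.floordiv_lt_iff_lt_mul (a := lo + hi) (q := hi) (show (0:Int) < 2 by norm_num)).mpr (by omega)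
    omega
  · have hb := PySem.Int.floordiv_two_mid_bounds (le_of_lt h)
    omega

-- Source B's 'for o in range(idx-1,-1,-1)' loop, with its early break
def oloopB (sc : List (Int × Int)) (coeffs : List Int) (n rhs : Int) :
    List Int → List (List Int) → List (List Int)
  | [], acc => acc
  | o :: rest, acc =>
      let a_o := PySem.List.pyGetD coeffs o 0
      if a_o + PySem.List.pyGetD coeffs (-1) 0 ≤ rhs then acc
      else
        let f := bsearch (fun i => decide (a_o + PySem.List.pyGetD coeffs i 0 > rhs)) 0 (n - 1)
        oloopB sc coeffs n rhs rest
          (acc ++ [[(PySem.List.pyGetD sc o (0,0)).1] ++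
            (PySem.List.pyRange f n 1).map (fun i => (PySem.List.pyGetD sc i (0,0)).1)])

-- one constraint of Source B's outer loop
def procB (c : List (Int × Int)) (rhs : Int) : List (List Int) :=
  let n := PySem.List.len c
  if n < 2 then []
  else
    let sc := PySem.List.sorted c (fun x => x.2) false
    let coeffs := sc.map (fun x => x.2)
    if PySem.List.pyGetD coeffs (-1) 0 + PySem.List.pyGetD coeffs (-2) 0 > rhs then
      let idx := bsearch (fun s => decide (PySem.List.pyGetD coeffs s 0 + PySem.List.pyGetD coeffs (s+1) 0 > rhs)) 0 (n - 2)
      oloopB sc coeffs n rhs (PySem.List.pyRange (idx-1) (-1) (-1))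
        [(PySem.List.pyRange idx n 1).map (fun i => (PySem.List.pyGetD sc i (0,0)).1)]
    else []

def clique_detection_alt (A : List (List (Int × Int))) (b : List Int) : List (List Int) :=
  (A.zip b).foldl (fun S cb => S ++ procB cb.1 cb.2) []

-- ===== PRECONDITION & SPEC =====
def Spec_clique_detection (A : List (List (Int × Int))) (b : List Int) (out : List (List Int)) : Prop := out = clique_detection_alt A b
instance (A : List (List (Int × Int))) (b : List Int) (out : List (List Int)) : Decidable (Spec_clique_detection A b out) := by unfold Spec_clique_detection; infer_instance

-- ===== CLAIM (what is proved, stated in full; the proofs are below) =====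
def Claim_equal_clique_detection : Prop := ∀ (A : List (List (Int × Int))) (b : List Int), Dom_clique_detection A b → Spec_clique_detection A b (clique_detection A b)

-- ===== LEMMAS AND PROOFS =====

-- r is the least index in [0, hi] satisfying P, phrased locally (P r and ¬P (r-1))
def IsLeast01 (P : Int → Bool) (hi r : Int) : Prop :=
  0 ≤ r ∧ r ≤ hi ∧ P r = true ∧ (r = 0 ∨ P (r-1) = false)

theorem isLeast01_mono_hi {P : Int → Bool} {hi hi' r : Int} (h : IsLeast01 P hi r)
    (hh : hi ≤ hi') : IsLeast01 P hi' r := by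
  obtain ⟨h0, h1, h2, h3⟩ := h; exact ⟨h0, le_trans h1 hh, h2, h3⟩

theorem least_unique {P Q : Int → Bool} {hi r1 r2 : Int}
    (hmono : ∀ i j : Int, 0 ≤ i → i ≤ j → j ≤ hi → P i = true → P j = true)
    (hagree : ∀ i : Int, 0 ≤ i → i ≤ hi → P i = Q i)
    (h1 : IsLeast01 P hi r1) (h2 : IsLeast01 Q hi r2) : r1 = r2 := by
  obtain ⟨a0, a1, a2, a3⟩ := h1
  obtain ⟨b0, b1, b2, b3⟩ := h2
  rcases lt_trichotomy r1 r2 with h | h | h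
  · have hq : Q (r2 - 1) = false := by rcases b3 with h' | h' <;> [omega; exact h']
    have hp : P (r2 - 1) = true := hmono r1 (r2-1) a0 (by omega) (by omega) a2
    rw [hagree (r2-1) (by omega) (by omega)] at hp
    simp [hp] at hq
  · exact h
  · have hp : P (r1 - 1) = false := by rcases a3 with h' | h' <;> [omega; exact h']
    have hq : P r2 = true := by rw [hagree r2 b0 b1]; exact b2
    have := hmono r2 (r1-1) b0 (by omega) (by omega) hq
    simp [this] at hp

theorem scanS_isLeast (P : Int → Bool) :
    ∀ (m : Nat) (t : Int), (t+1).toNat = m → 0 ≤ t + 1 → P (t+1) = true →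
    IsLeast01 P (t+1) (scanS P (PySem.List.pyRange t (-1) (-1)) (t+1)) := by
  intro m
  induction m with
  | zero =>
    intro t hm h0 hP
    have ht : t = -1 := by omega
    subst ht
    rw [PySem.List.pyRange_neg_one_eq_nil (by omega)]
    simp only [scanS]
    exact ⟨by omega, by omega, hP, Or.inl (by omega)⟩
  | succ m ih =>
    intro t hm h0 hP
    have ht : 0 ≤ t := by omega
    rw [PySem.List.pyRange_neg_one_cons (by omega)]
    show IsLeast01 P (t+1) (if P t then scanS P (PySem.List.pyRange (t-1) (-1) (-1)) t else (t+1))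
    by_cases hPt : P t = true
    · rw [if_pos hPt]
      have := ih (t-1) (by omega) (by omega) (by simpa using hPt)
      simp only [show t - 1 + 1 = t by omega] at this
      exact isLeast01_mono_hi this (by omega)
    · rw [if_neg (by simpa using hPt)]
      exact ⟨by omega, le_refl _, hP, Or.inr (by simpa [show t + 1 - 1 = t by omega] using hPt)⟩

theorem scanF_eq_scanS (P : Int → Bool) : ∀ (l : List Int) (c : Int),
    scanF P l (some c) = some (scanS P l c) := by
  intro l
  induction l with
  | nil => intro c; rfl
  | cons x xs ih =>
    intro c
    show (if P x then scanF P xs (some x) else some c) = some (if P x then scanS P xs x else c)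
    by_cases h : P x = true <;> simp [h, ih]

theorem bsearch_isLeast (P : Int → Bool) :
    ∀ (m : Nat) (lo hi : Int), (hi - lo).toNat = m → 0 ≤ lo → lo ≤ hi → P hi = true →
    (lo = 0 ∨ P (lo-1) = false) → IsLeast01 P hi (bsearch P lo hi) := by
  intro m
  induction m using Nat.strong_induction_on with
  | _ m ih =>
  intro lo hi hm h0 hle hhi hlo
  rw [bsearch]
  by_cases hlt : lo < hi
  · rw [dif_pos hlt]
    have hb := PySem.Int.floordiv_two_mid_bounds (le_of_lt hlt)
    have hmidlt : PySem.Int.floordiv (lo + hi) 2 < hi :=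
      (PySem.Int.floordiv_lt_iff_lt_mul (a := lo + hi) (q := hi) (show (0:Int) < 2 by norm_num)).mpr (by omega)
    by_cases hP : P (PySem.Int.floordiv (lo + hi) 2) = true
    · rw [if_pos hP]
      have := ih (PySem.Int.floordiv (lo + hi) 2 - lo).toNat (by omega)
        lo (PySem.Int.floordiv (lo + hi) 2) rfl h0 (by omega) hP hlo
      exact isLeast01_mono_hi this (by omega)
    · rw [if_neg (by simpa using hP)]
      exact ih (hi - (PySem.Int.floordiv (lo + hi) 2 + 1)).toNat (by omega)
        (PySem.Int.floordiv (lo + hi) 2 + 1) hi rfl (by omega) (by omega) hhi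
        (Or.inr (by simpa using hP))
  · rw [dif_neg hlt]
    have : lo = hi := by omega
    subst this
    exact ⟨h0, le_refl _, hhi, hlo⟩

theorem foldl_id {α β : Type} (l : List α) (f : β → α → β) (acc : β)
    (h : ∀ a ∈ l, ∀ s, f s a = s) : l.foldl f acc = acc := by
  induction l generalizing acc with
  | nil => rfl
  | cons x xs ih => simp only [List.foldl_cons, h x (by simp)]; exact ih _ (fun a ha s => h a (by simp [ha]) s)

-- pyGetD at -1 / -2 in getElem form
theorem pyGetD_neg_one_getElem {α : Type} (xs : List α) (d : α) (h : 1 ≤ xs.length) :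
    PySem.List.pyGetD xs (-1) d = xs[xs.length - 1]'(by omega) := by
  rw [PySem.List.pyGetD_neg_ofNat xs 1 d (by norm_num) h]

theorem pyGetD_neg_two_getElem {α : Type} (xs : List α) (d : α) (h : 2 ≤ xs.length) :
    PySem.List.pyGetD xs (-2) d = xs[xs.length - 2]'(by omega) := by
  rw [PySem.List.pyGetD_neg_ofNat xs 2 d (by norm_num) h]

-- coefficient list vs the sorted pair list
theorem hcoe_lemma (sc : List (Int × Int)) (i : Int) (h0 : 0 ≤ i) (h1 : i < (sc.length : Int)) :
    PySem.List.pyGetD (sc.map (fun x => x.2)) i 0 = (PySem.List.pyGetD sc i (0,0)).2 := by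
  rw [PySem.List.pyGetD_eq_getElem _ _ h0 (by simpa using h1),
      PySem.List.pyGetD_eq_getElem _ _ h0 h1]
  simp

theorem pyGetD_neg_one_int {α : Type} (xs : List α) (d : α) (h : 1 ≤ xs.length) :
    PySem.List.pyGetD xs (-1) d = PySem.List.pyGetD xs ((xs.length : Int) - 1) d := by
  rw [pyGetD_neg_one_getElem xs d h, PySem.List.pyGetD_eq_getElem xs d (by omega) (by omega)]
  congr 1; omega

theorem pyGetD_neg_two_int {α : Type} (xs : List α) (d : α) (h : 2 ≤ xs.length) :
    PySem.List.pyGetD xs (-2) d = PySem.List.pyGetD xs ((xs.length : Int) - 2) d := by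
  rw [pyGetD_neg_two_getElem xs d h, PySem.List.pyGetD_eq_getElem xs d (by omega) (by omega)]
  congr 1; omega

-- A's f-scan contributes nothing when even the largest coefficient is too small
theorem bodyA_none (sc : List (Int × Int)) (rhs o : Int) (hn : 2 ≤ sc.length)
    (h : (PySem.List.pyGetD sc o (0,0)).2 + (PySem.List.pyGetD sc ((sc.length:Int)-1) (0,0)).2 ≤ rhs) :
    ∀ s, bodyA sc rhs s o = s := by
  intro s
  unfold bodyA
  simp only [PySem.List.len_eq]
  rw [PySem.List.pyRange_neg_one_cons (by omega : (-1:Int) < (sc.length:Int) - 1)]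
  simp only [scanF]
  rw [if_neg (by simp; omega)]

-- A's f-scan finds the least admissible index when the largest coefficient fits
theorem bodyA_some (sc : List (Int × Int)) (rhs o : Int) (hn : 2 ≤ sc.length)
    (h : rhs < (PySem.List.pyGetD sc o (0,0)).2 + (PySem.List.pyGetD sc ((sc.length:Int)-1) (0,0)).2) :
    ∃ r, IsLeast01 (fun f => decide ((PySem.List.pyGetD sc o (0,0)).2 + (PySem.List.pyGetD sc f (0,0)).2 > rhs)) ((sc.length:Int)-1) r ∧
      ∀ s, bodyA sc rhs s o = s ++ [[(PySem.List.pyGetD sc o (0,0)).1] ++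
        (PySem.List.pyRange r ((sc.length:Int)) 1).map (fun i => (PySem.List.pyGetD sc i (0,0)).1)] := by
  have hP : (fun f => decide ((PySem.List.pyGetD sc o (0,0)).2 + (PySem.List.pyGetD sc f (0,0)).2 > rhs)) ((sc.length:Int)-1) = true := by
    simp; omega
  refine ⟨scanS (fun f => decide ((PySem.List.pyGetD sc o (0,0)).2 + (PySem.List.pyGetD sc f (0,0)).2 > rhs)) (PySem.List.pyRange ((sc.length:Int)-2) (-1) (-1)) ((sc.length:Int)-1), ?_, ?_⟩
  · have hs := scanS_isLeast (fun f => decide ((PySem.List.pyGetD sc o (0,0)).2 + (PySem.List.pyGetD sc f (0,0)).2 > rhs))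
      ((sc.length:Int)-1).toNat ((sc.length:Int)-2) (by omega) (by omega) (by simpa [show (sc.length:Int)-2+1 = (sc.length:Int)-1 by ring] using hP)
    simpa [show (sc.length:Int)-2+1 = (sc.length:Int)-1 by ring] using hs
  · intro s
    unfold bodyA
    simp only [PySem.List.len_eq]
    rw [PySem.List.pyRange_neg_one_cons (by omega : (-1:Int) < (sc.length:Int) - 1)]
    simp only [scanF]
    rw [if_pos hP, show (sc.length:Int) - 1 - 1 = (sc.length:Int) - 2 by ring, scanF_eq_scanS]
    simp

theorem oloop_eq (sc : List (Int × Int)) (rhs n : Int)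
    (hnn : n = (sc.length : Int)) (hn : 2 ≤ sc.length)
    (hmono : ∀ i j : Int, 0 ≤ i → i ≤ j → j < (sc.length:Int) →
      (PySem.List.pyGetD sc i (0,0)).2 ≤ (PySem.List.pyGetD sc j (0,0)).2) :
    ∀ (m : Nat) (t : Int) (acc : List (List Int)), (t+1).toNat = m → t ≤ n - 2 →
    (PySem.List.pyRange t (-1) (-1)).foldl (bodyA sc rhs) acc
      = oloopB sc (sc.map fun x => x.2) n rhs (PySem.List.pyRange t (-1) (-1)) acc := by
  subst hnn
  have hcoe : ∀ i : Int, 0 ≤ i → i < (sc.length:Int) →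
      PySem.List.pyGetD (sc.map (fun x => x.2)) i 0 = (PySem.List.pyGetD sc i (0,0)).2 :=
    fun i h0 h1 => hcoe_lemma sc i h0 h1
  have hclen : (sc.map (fun x => x.2)).length = sc.length := by simp
  have hneg1 : PySem.List.pyGetD (sc.map (fun x => x.2)) (-1) 0 = (PySem.List.pyGetD sc ((sc.length:Int)-1) (0,0)).2 := by
    rw [pyGetD_neg_one_int _ _ (by omega), hclen, hcoe _ (by omega) (by omega)]
  intro m
  induction m with
  | zero =>
    intro t acc hm ht
    rw [PySem.List.pyRange_neg_one_eq_nil (by omega : t ≤ -1)]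
    rfl
  | succ m ih =>
    intro t acc hm ht
    have ht0 : 0 ≤ t := by omega
    rw [PySem.List.pyRange_neg_one_cons (by omega : (-1:Int) < t)]
    simp only [List.foldl_cons, oloopB]
    have hat : PySem.List.pyGetD (sc.map (fun x => x.2)) t 0 = (PySem.List.pyGetD sc t (0,0)).2 :=
      hcoe t ht0 (by omega)
    by_cases hPk : (PySem.List.pyGetD sc t (0,0)).2 + (PySem.List.pyGetD sc ((sc.length:Int)-1) (0,0)).2 ≤ rhs
    · rw [if_pos (by rw [hat, hneg1]; exact hPk)]
      rw [bodyA_none sc rhs t hn (by exact hPk) acc]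
      exact foldl_id _ _ _ (fun o ho s => by
        have hmem := PySem.List.mem_pyRange_neg_one.mp ho
        exact bodyA_none sc rhs o hn (by
          have := hmono o t (by omega) (by omega) (by omega)
          omega) s)
    · rw [if_neg (by rw [hat, hneg1]; exact hPk)]
      obtain ⟨r, hr, hbody⟩ := bodyA_some sc rhs t hn (by omega)
      have hb := bsearch_isLeast (fun i => decide (PySem.List.pyGetD (sc.map (fun x => x.2)) t 0 + PySem.List.pyGetD (sc.map (fun x => x.2)) i 0 > rhs))
        ((sc.length:Int)-1).toNat 0 ((sc.length:Int)-1) (by omega) (le_refl 0) (by omega)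
        (by simp only [hat, hcoe ((sc.length:Int)-1) (by omega) (by omega)]; simp; omega) (Or.inl rfl)
      have hreq : r = bsearch (fun i => decide (PySem.List.pyGetD (sc.map (fun x => x.2)) t 0 + PySem.List.pyGetD (sc.map (fun x => x.2)) i 0 > rhs)) 0 ((sc.length:Int)-1) := by
        refine least_unique (hi := (sc.length:Int)-1) ?_ ?_ hr hb
        · intro i j h0 hij hj hPi
          simp only [decide_eq_true_eq] at hPi ⊢
          have := hmono i j h0 hij (by omega)
          omega
        · intro i h0 hi
          simp only [hat, hcoe i h0 (by omega)]
      rw [hbody acc, hreq]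
      exact ih (t-1) _ (by omega) (by omega)

theorem proc_eq (c : List (Int × Int)) (rhs : Int) : procA c rhs = procB c rhs := by
  unfold procA procB
  simp only [PySem.List.len_eq]
  by_cases h2 : (c.length : Int) < 2
  · rw [if_pos h2, if_pos h2]
  · set sc := PySem.List.sorted c (fun x => x.2) false with hsc
    have hlensc : sc.length = c.length := by rw [hsc]; exact PySem.List.length_sorted c _ false
    have hn : 2 ≤ sc.length := by omega
    have hcl : (c.length : Int) = (sc.length : Int) := by rw [hlensc]
    rw [if_neg h2, if_neg h2, hcl]
    rw [show ((sc.length:Int) - 1 - 2) = (sc.length:Int) - 3 by ring,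
        show ((sc.length:Int) - 1 - 1) = (sc.length:Int) - 2 by ring]
    have hmono : ∀ i j : Int, 0 ≤ i → i ≤ j → j < (sc.length:Int) →
        (PySem.List.pyGetD sc i (0,0)).2 ≤ (PySem.List.pyGetD sc j (0,0)).2 := by
      intro i j h0 hij hj
      rw [PySem.List.pyGetD_eq_getElem sc _ h0 (by omega), PySem.List.pyGetD_eq_getElem sc _ (by omega) hj]
      exact PySem.List.key_sorted_getElem_mono c (fun x => x.2) (by omega)
        (by rw [PySem.List.length_sorted]; omega)
    have hcoe : ∀ i : Int, 0 ≤ i → i < (sc.length:Int) →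
        PySem.List.pyGetD (sc.map (fun x => x.2)) i 0 = (PySem.List.pyGetD sc i (0,0)).2 :=
      fun i h0 h1 => hcoe_lemma sc i h0 h1
    have hneg1sc := pyGetD_neg_one_int sc (0,0) (by omega)
    have hneg2sc := pyGetD_neg_two_int sc (0,0) (by omega)
    have hneg1co : PySem.List.pyGetD (sc.map (fun x => x.2)) (-1) 0 = (PySem.List.pyGetD sc ((sc.length:Int)-1) (0,0)).2 := by
      rw [pyGetD_neg_one_int _ _ (by simp; omega)]
      simp only [List.length_map]
      exact hcoe _ (by omega) (by omega)
    have hneg2co : PySem.List.pyGetD (sc.map (fun x => x.2)) (-2) 0 = (PySem.List.pyGetD sc ((sc.length:Int)-2) (0,0)).2 := by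
      rw [pyGetD_neg_two_int _ _ (by simp; omega)]
      simp only [List.length_map]
      exact hcoe _ (by omega) (by omega)
    rw [hneg1sc, hneg2sc, hneg1co, hneg2co]
    by_cases hguard : (PySem.List.pyGetD sc ((sc.length:Int)-1) (0,0)).2 + (PySem.List.pyGetD sc ((sc.length:Int)-2) (0,0)).2 > rhs
    · rw [if_pos hguard, if_pos hguard]
      have hSA := scanS_isLeast (fun s => decide ((PySem.List.pyGetD sc s (0,0)).2 + (PySem.List.pyGetD sc (s+1) (0,0)).2 > rhs))
        ((sc.length:Int)-2).toNat ((sc.length:Int)-3) (by omega) (by omega)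
        (by
          simp only [show ((sc.length:Int)-3)+1 = (sc.length:Int)-2 by ring, decide_eq_true_eq,
            show ((sc.length:Int)-2)+1 = (sc.length:Int)-1 by ring]
          omega)
      simp only [show ((sc.length:Int)-3)+1 = (sc.length:Int)-2 by ring] at hSA
      have hSB := bsearch_isLeast (fun s => decide (PySem.List.pyGetD (sc.map (fun x => x.2)) s 0 + PySem.List.pyGetD (sc.map (fun x => x.2)) (s+1) 0 > rhs))
        ((sc.length:Int)-2).toNat 0 ((sc.length:Int)-2) (by omega) (le_refl 0) (by omega)
        (by
          simp only [decide_eq_true_eq, hcoe ((sc.length:Int)-2) (by omega) (by omega),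
            show ((sc.length:Int)-2)+1 = (sc.length:Int)-1 by ring,
            hcoe ((sc.length:Int)-1) (by omega) (by omega)]
          omega) (Or.inl rfl)
      have hidx := least_unique (hi := (sc.length:Int)-2)
        (by
          intro i j h0 hij hj hPi
          simp only [decide_eq_true_eq] at hPi ⊢
          have h1 := hmono i j h0 hij (by omega)
          have h2 := hmono (i+1) (j+1) (by omega) (by omega) (by omega)
          omega)
        (by
          intro i h0 hi
          simp only [hcoe i h0 (by omega), hcoe (i+1) (by omega) (by omega)])
        hSA hSB
      rw [← hidx]
      exact oloop_eq sc rhs ((sc.length:Int)) rfl hn hmono _ _ _ rfl (by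
        obtain ⟨ha, hb, -, -⟩ := hSA
        omega)
    · rw [if_neg hguard, if_neg hguard]

-- ===== VERDICT (by name: the statement is the Claim_ definition above) =====
theorem clique_detection_spec : Claim_equal_clique_detection := by
  intro A b _
  unfold Spec_clique_detection clique_detection clique_detection_alt
  have h : (fun (S : List (List Int)) (cb : List (Int × Int) × Int) => S ++ procA cb.1 cb.2)
      = (fun S cb => S ++ procB cb.1 cb.2) := by
    funext S cb; rw [proc_eq]
  rw [h]
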